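-- pv_equiv track=rewrite | github.com/markku63/mooc-tira-s20 | Viikko_4/fliptwo.py | solve
-- ===== SOURCE A (Python) =====
-- from collections import deque
--
-- def solve(n,k):
--     pakka = deque([i+1 for i in range(n)])
--     for i in range(k):
--         a = pakka.popleft()
--         b = pakka.popleft()
--         pakka.append(b)
--         pakka.append(a)
--     return pakka[0]
-- ===== SOURCE B (Python) =====
-- def solve(n, k):
--     # Closed form: even positions of the deck always hold 1,3,5,... in order;
--     # the front element is periodic with period (n+1)//2 for odd n and n for even n.
--     if n == 1 or k <= 0:
--         return 1
--     if n % 2 == 1: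
--         return 2 * (k % ((n + 1) // 2)) + 1
--     r = k % n
--     if r < n // 2:
--         return 2 * r + 1
--     return 2 * (r - n // 2) + 2
-- ===== Notes on version B (the rewrite author's own statement) =====
-- stated objective: faster
-- what changed: Replaces the k-round deque simulation by an O(1) closed form: the front element is periodic with period (n+1)//2 for odd n and n for even n, so B returns it directly from k mod the period.
import Mathlib
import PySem

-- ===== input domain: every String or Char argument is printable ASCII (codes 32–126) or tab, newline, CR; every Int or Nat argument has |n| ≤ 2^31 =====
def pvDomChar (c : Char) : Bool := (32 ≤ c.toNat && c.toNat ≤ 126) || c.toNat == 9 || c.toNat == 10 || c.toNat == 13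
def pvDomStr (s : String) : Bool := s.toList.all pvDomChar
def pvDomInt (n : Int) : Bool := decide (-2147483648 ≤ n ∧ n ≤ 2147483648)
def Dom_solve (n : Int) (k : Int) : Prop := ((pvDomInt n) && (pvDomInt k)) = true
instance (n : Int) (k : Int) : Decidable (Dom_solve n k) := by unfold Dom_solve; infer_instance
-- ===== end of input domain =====

-- B replaces A's O(k) deque simulation by an O(1) closed form (front element is
-- periodic in k); equivalence of the RETURN value is proved on Pre_solve.

-- ===== PORT A =====
-- one round: a = popleft; b = popleft; append b; append a  (identity on decks
-- of fewer than 2 elements, where Python raises IndexError — excluded by Pre_solve)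
def stepA : List Int → List Int
  | a :: b :: rest => rest ++ [b, a]
  | d => d

def solve (n : Int) (k : Int) : Int :=
  let pakka := (PySem.List.pyRange 0 n 1).map (· + 1)
  let final := (List.range k.toNat).foldl (fun d _ => stepA d) pakka
  -- pakka[0]; Python raises IndexError on an empty deck (n ≤ 0) — excluded by Pre_solve
  (PySem.List.pyGet? final 0).getD 0

-- ===== PORT B =====
def solve_alt (n : Int) (k : Int) : Int :=
  if n = 1 ∨ k ≤ 0 then 1
  else if PySem.Int.mod n 2 = 1 then
    2 * PySem.Int.mod k (PySem.Int.floordiv (n + 1) 2) + 1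
  else
    let r := PySem.Int.mod k n
    if r < PySem.Int.floordiv n 2 then 2 * r + 1
    else 2 * (r - PySem.Int.floordiv n 2) + 2

-- ===== PRECONDITION & SPEC =====
-- A raises IndexError when the deck is empty (n ≤ 0) or when a round pops from a
-- deck of fewer than 2 cards (n = 1 with k ≥ 1); exactly those inputs are excluded.
def Pre_solve (n : Int) (k : Int) : Prop := 1 ≤ n ∧ (n = 1 → k ≤ 0)
instance (n : Int) (k : Int) : Decidable (Pre_solve n k) := by unfold Pre_solve; infer_instance
def pvWitness_solve : Int × Int := (6, 4)

def Spec_solve (n : Int) (k : Int) (out : Int) : Prop := out = solve_alt n k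
instance (n : Int) (k : Int) (out : Int) : Decidable (Spec_solve n k out) := by unfold Spec_solve; infer_instance

-- ===== CLAIM (what is proved, stated in full; the proofs are below) =====
def Claim_equal_solve : Prop := ∀ (n : Int) (k : Int), Dom_solve n k → Pre_solve n k → Spec_solve n k (solve n k)

-- ===== LEMMAS AND PROOFS =====

def stepIter (j : Nat) (d : List Int) : List Int :=
  (List.range j).foldl (fun d _ => stepA d) d

theorem stepIter_succ (j : Nat) (d : List Int) :
    stepIter (j + 1) d = stepA (stepIter j d) := by
  simp [stepIter, List.range_succ]

-- interleave es os: es at even positions, os at odd positions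
def interleave : List Int → List Int → List Int
  | [], ys => ys
  | x :: xs, ys => x :: interleave ys xs
termination_by xs ys => xs.length + ys.length
decreasing_by simp; omega

theorem interleave_nil (ys : List Int) : interleave [] ys = ys := by
  simp [interleave]

theorem interleave_cons (x : Int) (xs ys : List Int) :
    interleave (x :: xs) ys = x :: interleave ys xs := by
  simp [interleave]

theorem interleave_cons₂ (x y : Int) (xs ys : List Int) :
    interleave (x :: xs) (y :: ys) = x :: y :: interleave xs ys := by
  rw [interleave_cons, interleave_cons]

theorem interleave_append_even :
    ∀ (xs ys : List Int) (b a : Int), xs.length = ys.length →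
      interleave xs ys ++ [b, a] = interleave (xs ++ [b]) (ys ++ [a])
  | [], [], b, a, _ => by simp [interleave_cons₂, interleave_nil]
  | x :: xs, y :: ys, b, a, h => by
    simp only [interleave_cons₂, List.cons_append]
    have := interleave_append_even xs ys b a (by simpa using h)
    simp [this]

theorem interleave_append_odd :
    ∀ (xs ys : List Int) (b a : Int), xs.length = ys.length + 1 →
      interleave xs ys ++ [b, a] = interleave (xs ++ [a]) (ys ++ [b])
  | [x], [], b, a, _ => by
    simp [interleave_cons, interleave_nil]
  | x :: x' :: xs, [], b, a, h => by simp at h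
  | x :: xs, y :: ys, b, a, h => by
    simp only [interleave_cons₂, List.cons_append]
    have := interleave_append_odd xs ys b a (by simpa using h)
    simp [this]

theorem stepA_even (es os : List Int) (a b : Int) (h : es.length = os.length) :
    stepA (interleave (a :: es) (b :: os)) = interleave (es ++ [b]) (os ++ [a]) := by
  rw [interleave_cons₂]
  show interleave es os ++ [b, a] = _
  exact interleave_append_even es os b a h

theorem stepA_odd (es os : List Int) (a b : Int) (h : es.length = os.length + 1) :
    stepA (interleave (a :: es) (b :: os)) = interleave (es ++ [a]) (os ++ [b]) := by
  rw [interleave_cons₂]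
  show interleave es os ++ [b, a] = _
  exact interleave_append_odd es os b a h

theorem iter_odd :
    ∀ (k : Nat) (es os : List Int), os ≠ [] → es.length = os.length + 1 →
      stepIter k (interleave es os) = interleave (es.rotate k) (os.rotate k) := by
  intro k
  induction k with
  | zero => intro es os _ _; simp [stepIter]
  | succ k ih =>
    intro es os hos h
    rw [stepIter_succ, ih es os hos h]
    obtain ⟨a, es₁, hE⟩ := List.exists_cons_of_ne_nil
      (show es.rotate k ≠ [] by
        simp only [ne_eq, List.rotate_eq_nil_iff]
        intro hnil; subst hnil; simp at h)
    obtain ⟨b, os₁, hO⟩ := List.exists_cons_of_ne_nil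
      (show os.rotate k ≠ [] by
        simp only [ne_eq, List.rotate_eq_nil_iff]; exact hos)
    rw [hE, hO, stepA_odd]
    · have h1 : es.rotate (k + 1) = es₁ ++ [a] := by
        rw [← List.rotate_rotate, hE]
        simpa using List.rotate_cons_succ es₁ a 0
      have h2 : os.rotate (k + 1) = os₁ ++ [b] := by
        rw [← List.rotate_rotate, hO]
        simpa using List.rotate_cons_succ os₁ b 0
      rw [h1, h2]
    · have hle : (es.rotate k).length = (os.rotate k).length + 1 := by simpa using h
      rw [hE, hO] at hle; simpa using hle

theorem iter_even :
    ∀ (k : Nat) (es os : List Int), es ≠ [] → es.length = os.length →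
      stepIter k (interleave es os) =
        interleave (((es ++ os).rotate k).take es.length)
                   (((es ++ os).rotate k).drop es.length) := by
  intro k
  induction k with
  | zero =>
    intro es os _ _
    simp [stepIter]
  | succ k ih =>
    intro es os hes h
    rw [stepIter_succ, ih es os hes h]
    set W := (es ++ os).rotate k with hW
    have hWlen : W.length = es.length + os.length := by simp [hW]
    have hm : 1 ≤ es.length := by
      cases es with | nil => exact absurd rfl hes | cons _ _ => simp
    obtain ⟨a, es₁, hE⟩ := List.exists_cons_of_ne_nil
      (show W.take es.length ≠ [] from
        List.ne_nil_of_length_pos (by rw [List.length_take]; omega))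
    obtain ⟨b, os₁, hO⟩ := List.exists_cons_of_ne_nil
      (show W.drop es.length ≠ [] from
        List.ne_nil_of_length_pos (by rw [List.length_drop]; omega))
    have hE1 : es₁.length = es.length - 1 := by
      have := congrArg List.length hE; simp at this; omega
    have hO1 : os₁.length = os.length - 1 := by
      have := congrArg List.length hO; simp at this; omega
    rw [hE, hO, stepA_even es₁ os₁ a b (by omega)]
    have hsplit : W = a :: (es₁ ++ (b :: os₁)) := by
      rw [← List.take_append_drop es.length W, hE, hO]; simp
    have hrot : W.rotate 1 = (es₁ ++ [b]) ++ (os₁ ++ [a]) := by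
      rw [hsplit]
      have := List.rotate_cons_succ (es₁ ++ (b :: os₁)) a 0
      simpa using this
    have hrr : (es ++ os).rotate (k + 1) = W.rotate 1 := by
      rw [hW, List.rotate_rotate]
    rw [hrr, hrot,
      List.take_left' (by simp; omega), List.drop_left' (by simp; omega)]


theorem range_map_succ (n : Nat) (f : Nat → Int) :
    (List.range (n + 1)).map f = f 0 :: (List.range n).map (fun i => f (i + 1)) := by
  rw [List.range_succ_eq_map, List.map_cons, List.map_map]; rfl

theorem il_range_even :
    ∀ (m : Nat) (c : Int),
      interleave ((List.range m).map fun (i : Nat) => c + 2 * (i : Int))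
                 ((List.range m).map fun (i : Nat) => c + 1 + 2 * (i : Int))
        = (List.range (2 * m)).map fun (i : Nat) => c + (i : Int)
  | 0, c => by simp [interleave_nil]
  | m + 1, c => by
    rw [range_map_succ m (fun (i : Nat) => c + 2 * (i : Int)), range_map_succ m (fun (i : Nat) => c + 1 + 2 * (i : Int)),
      interleave_cons₂]
    have e1 : (List.range m).map (fun i => c + 2 * ((i + 1 : Nat) : Int))
        = (List.range m).map (fun (i : Nat) => (c + 2) + 2 * (i : Int)) := by
      apply List.map_congr_left; intro i _; push_cast; ring
    have e2 : (List.range m).map (fun i => c + 1 + 2 * ((i + 1 : Nat) : Int))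
        = (List.range m).map (fun (i : Nat) => (c + 2) + 1 + 2 * (i : Int)) := by
      apply List.map_congr_left; intro i _; push_cast; ring
    rw [e1, e2, il_range_even m (c + 2)]
    have h2m : 2 * (m + 1) = (2 * m + 1) + 1 := by ring
    rw [h2m, range_map_succ (2 * m + 1) (fun (i : Nat) => c + (i : Int)),
      range_map_succ (2 * m) (fun i => c + ((i + 1 : Nat) : Int))]
    refine congrArg₂ _ (by push_cast; ring) (congrArg₂ _ (by push_cast; ring) ?_)
    apply List.map_congr_left; intro i _; push_cast; ring

theorem il_range_odd :
    ∀ (m : Nat) (c : Int),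
      interleave ((List.range (m + 1)).map fun (i : Nat) => c + 2 * (i : Int))
                 ((List.range m).map fun (i : Nat) => c + 1 + 2 * (i : Int))
        = (List.range (2 * m + 1)).map fun (i : Nat) => c + (i : Int)
  | 0, c => by simp [interleave_cons, interleave_nil]
  | m + 1, c => by
    rw [range_map_succ (m + 1) (fun (i : Nat) => c + 2 * (i : Int)), range_map_succ m (fun (i : Nat) => c + 1 + 2 * (i : Int)),
      interleave_cons₂]
    have e1 : (List.range (m + 1)).map (fun i => c + 2 * ((i + 1 : Nat) : Int))
        = (List.range (m + 1)).map (fun (i : Nat) => (c + 2) + 2 * (i : Int)) := by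
      apply List.map_congr_left; intro i _; push_cast; ring
    have e2 : (List.range m).map (fun i => c + 1 + 2 * ((i + 1 : Nat) : Int))
        = (List.range m).map (fun (i : Nat) => (c + 2) + 1 + 2 * (i : Int)) := by
      apply List.map_congr_left; intro i _; push_cast; ring
    rw [e1, e2, il_range_odd m (c + 2)]
    have h2m : 2 * (m + 1) + 1 = (2 * m + 1 + 1) + 1 := by ring
    rw [h2m, range_map_succ (2 * m + 1 + 1) (fun (i : Nat) => c + (i : Int)),
      range_map_succ (2 * m + 1) (fun i => c + ((i + 1 : Nat) : Int))]
    refine congrArg₂ _ (by push_cast; ring) (congrArg₂ _ (by push_cast; ring) ?_)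
    apply List.map_congr_left; intro i _; push_cast; ring

-- ===== VERDICT (by name: the statement is the Claim_ definition above) =====
theorem solve_spec : Claim_equal_solve := by
  intro n k _ hp
  unfold Pre_solve at hp
  obtain ⟨hn1, hn2⟩ := hp
  unfold Spec_solve
  simp only [solve, solve_alt]
  by_cases hk : k ≤ 0
  · have hk0 : k.toNat = 0 := by omega
    rw [if_pos (Or.inr hk), hk0]
    simp only [List.range_zero, List.foldl_nil]
    rw [PySem.List.pyRange_one_cons (by omega : (0:Int) < n)]
    simp [PySem.List.pyGet?_zero_cons]
  · have hn2' : 2 ≤ n := by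
      by_cases h1 : n = 1
      · exact absurd (hn2 h1) hk
      · omega
    have hkn : k = (k.toNat : Int) := by omega
    set N := n.toNat with hN
    have hnN : n = (N : Int) := by omega
    have hN2 : 2 ≤ N := by omega
    have hpak : (PySem.List.pyRange 0 n 1).map (· + 1)
        = (List.range N).map (fun (i : Nat) => (1:Int) + (i : Int)) := by
      rw [PySem.List.pyRange_one, List.map_map]
      have h0 : (n - 0).toNat = N := by omega
      rw [h0]
      apply List.map_congr_left; intro i _; simp; ring
    rw [if_neg (by push_neg; exact ⟨by omega, by omega⟩), hpak]
    rw [PySem.Int.mod_eq_emod_of_pos (a := n) (b := 2) (by norm_num),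
      PySem.Int.mod_eq_emod_of_pos (a := k) (b := n) (by omega)]
    rcases Nat.even_or_odd N with hpar | hpar
    · -- even deck: N = 2*m
      obtain ⟨m, hm⟩ := hpar
      have hNm : N = 2 * m := by omega
      have hm1 : 1 ≤ m := by omega
      set esL := (List.range m).map (fun (i : Nat) => (1:Int) + 2 * (i : Int)) with hesL
      set osL := (List.range m).map (fun (i : Nat) => (1:Int) + 1 + 2 * (i : Int)) with hosL
      have hdeck : (List.range N).map (fun (i : Nat) => (1:Int) + (i : Int))
          = interleave esL osL := by
        rw [hNm]; exact (il_range_even m 1).symm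
      rw [hdeck]
      have hstep : (List.range k.toNat).foldl (fun d _ => stepA d) (interleave esL osL)
          = stepIter k.toNat (interleave esL osL) := rfl
      have hesLen : esL.length = m := by simp [hesL]
      have hosLen : osL.length = m := by simp [hosL]
      rw [hstep, iter_even k.toNat esL osL
        (List.ne_nil_of_length_pos (by omega)) (by omega)]
      have hWlen : ((esL ++ osL).rotate k.toNat).length = 2 * m := by
        rw [List.length_rotate, List.length_append, hesLen, hosLen]; omega
      set r := k.toNat % (2 * m) with hr
      have hrlt : r < 2 * m := Nat.mod_lt _ (by omega)
      obtain ⟨a, t, hE⟩ := List.exists_cons_of_ne_nil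
        (show ((esL ++ osL).rotate k.toNat).take esL.length ≠ [] from
          List.ne_nil_of_length_pos (by rw [List.length_take]; omega))
      have ha : a = (esL ++ osL)[r]'(by rw [List.length_append, hesLen, hosLen]; omega) := by
        have h0 : ((((esL ++ osL).rotate k.toNat)).take esL.length)[0]'(by rw [hE]; simp)
            = a := by simp [hE]
        rw [List.getElem_take, List.getElem_rotate] at h0
        rw [← h0]
        congr 1
        rw [List.length_append, hesLen, hosLen, Nat.zero_add, hr]
        congr 1
        omega
      rw [hE, interleave_cons]
      simp only [PySem.List.pyGet?_zero_cons, Option.getD_some]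
      rw [PySem.Int.floordiv_eq_ediv_of_pos (a := n) (b := 2) (by norm_num),
        if_neg (show ¬ n % 2 = 1 by omega)]
      have hn2m : n = ((2 * m : Nat) : Int) := by omega
      rw [hkn, hn2m, ← Int.natCast_mod, ← hr]
      have hnd : ((2 * m : Nat) : Int) / 2 = (m : Int) := by push_cast; omega
      rw [hnd]
      by_cases hcase : r < m
      · have hav : a = 1 + 2 * (r : Int) := by
          rw [ha, List.getElem_append_left (by omega)]
          simp [hesL]
        rw [hav, if_pos (by exact_mod_cast Nat.cast_lt.mpr hcase)]
        push_cast
        ring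
      · have hav : a = 1 + 1 + 2 * ((r - m : Nat) : Int) := by
          rw [ha, List.getElem_append_right (by omega)]
          simp [hosL, hesLen]
        rw [hav, if_neg (by push_cast; omega)]
        push_cast [Nat.cast_sub (by omega : m ≤ r)]
        ring
    · -- odd deck: N = 2*m + 1
      obtain ⟨m, hm⟩ := hpar
      have hm1 : 1 ≤ m := by omega
      set esL := (List.range (m + 1)).map (fun (i : Nat) => (1:Int) + 2 * (i : Int)) with hesL
      set osL := (List.range m).map (fun (i : Nat) => (1:Int) + 1 + 2 * (i : Int)) with hosL
      have hdeck : (List.range N).map (fun (i : Nat) => (1:Int) + (i : Int))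
          = interleave esL osL := by
        rw [hm]; exact (il_range_odd m 1).symm
      rw [hdeck]
      have hstep : (List.range k.toNat).foldl (fun d _ => stepA d) (interleave esL osL)
          = stepIter k.toNat (interleave esL osL) := rfl
      have hesLen : esL.length = m + 1 := by simp [hesL]
      have hosLen : osL.length = m := by simp [hosL]
      rw [hstep, iter_odd k.toNat esL osL
        (List.ne_nil_of_length_pos (by omega)) (by omega)]
      set r := k.toNat % (m + 1) with hr
      have hrlt : r < m + 1 := Nat.mod_lt _ (by omega)
      obtain ⟨a, t, hE⟩ := List.exists_cons_of_ne_nil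
        (show esL.rotate k.toNat ≠ [] from
          List.ne_nil_of_length_pos (by rw [List.length_rotate]; omega))
      have ha : a = 1 + 2 * (r : Int) := by
        have h0 : (esL.rotate k.toNat)[0]'(by rw [hE]; simp) = a := by simp [hE]
        rw [List.getElem_rotate] at h0
        rw [← h0]
        simp [hesL, hesLen, hr]
      rw [hE, interleave_cons]
      simp only [PySem.List.pyGet?_zero_cons, Option.getD_some]
      rw [if_pos (by omega : n % 2 = 1),
        PySem.Int.floordiv_eq_ediv_of_pos (a := n + 1) (b := 2) (by norm_num),
        PySem.Int.mod_eq_emod_of_pos (a := k) (b := (n + 1) / 2) (by omega)]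
      rw [ha]
      have hdiv : (n + 1) / 2 = ((m + 1 : Nat) : Int) := by push_cast; omega
      rw [hdiv, hkn, ← Int.natCast_mod, ← hr]
      ring
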